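-- pv_equiv track=rewrite | github.com/bernsmp/VoiceCraft | integrations/slack_bot.py | _is_website_edit_request
-- ===== SOURCE A (Python) =====
-- def _is_website_edit_request(message: str) -> bool:
--     """Check if message is a website editing request"""
--     triggers = [
--         "change the", "update the", "set the", "make the",
--         "edit the", "modify the", "what's the", "what is the",
--         "show me the", "headline", "tagline", "description",
--         "website", "site", "add", "create", "new"
--     ]
--     message_lower = message.lower()
--     return any(trigger in message_lower for trigger in triggers)
-- ===== SOURCE B (Python) =====
-- _TRIGGERS = ("change the", "update the", "set the", "make the",
--              "edit the", "modify the", "what's the", "what is the",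
--              "show me the", "headline", "tagline", "description",
--              "website", "site", "add", "create", "new")
--
--
-- def _is_website_edit_request(message: str) -> bool:
--     """Single left-to-right scan: at each position test whether a trigger starts there."""
--     m = message.lower()
--     for i in range(len(m)):
--         for t in _TRIGGERS:
--             if m.startswith(t, i):
--                 return True
--     return False
-- ===== Notes on version B (the rewrite author's own statement) =====
-- stated objective: alternative
-- what changed: Replaced the k independent whole-message substring searches with one left-to-right scan over the lowercased message that tests at each position whether any trigger starts there (startswith with an offset).
import Mathlib
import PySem

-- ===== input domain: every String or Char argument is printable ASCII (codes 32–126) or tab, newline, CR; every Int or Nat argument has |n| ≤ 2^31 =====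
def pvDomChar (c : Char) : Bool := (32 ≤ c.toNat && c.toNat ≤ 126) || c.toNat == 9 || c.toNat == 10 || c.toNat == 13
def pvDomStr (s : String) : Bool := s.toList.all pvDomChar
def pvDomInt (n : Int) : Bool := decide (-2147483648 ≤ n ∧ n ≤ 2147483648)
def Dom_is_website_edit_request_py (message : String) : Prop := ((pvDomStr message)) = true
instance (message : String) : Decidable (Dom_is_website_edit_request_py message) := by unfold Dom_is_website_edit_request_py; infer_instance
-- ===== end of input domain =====

-- B replaces A's k independent 'trigger in message' substring searches by one left-to-right
-- scan of the lowercased message, testing at each position whether a trigger starts there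
-- (objective: alternative, same behaviour).

-- ===== PORT A =====
def pvTriggers : List String :=
  ["change the", "update the", "set the", "make the",
   "edit the", "modify the", "what's the", "what is the",
   "show me the", "headline", "tagline", "description",
   "website", "site", "add", "create", "new"]

def is_website_edit_request_py (message : String) : Bool :=
  let message_lower := PySem.Str.lower message
  pvTriggers.any (fun trigger => PySem.Str.isIn trigger message_lower)

-- ===== PORT B =====
-- the inner 'for t in _TRIGGERS: if m.startswith(t, i)' at one position i (cs = suffix of m at i)
def pvScanHere (cs : List Char) : Bool :=
  pvTriggers.any (fun t => PySem.Chars.startswith cs t.toList)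

-- the outer 'for i in range(len(m))' loop, walking the suffixes left to right
def pvScan (cs : List Char) : Bool :=
  match cs with
  | [] => false
  | _ :: rest => pvScanHere cs || pvScan rest

def is_website_edit_request_py_alt (message : String) : Bool :=
  pvScan (PySem.Chars.lower message.toList)

-- ===== PRECONDITION & SPEC =====
def Spec_is_website_edit_request_py (message : String) (out : Bool) : Prop := out = is_website_edit_request_py_alt message
instance (message : String) (out : Bool) : Decidable (Spec_is_website_edit_request_py message out) := by unfold Spec_is_website_edit_request_py; infer_instance

-- ===== CLAIM (what is proved, stated in full; the proofs are below) =====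
def Claim_equal_is_website_edit_request_py : Prop := ∀ (message : String), Dom_is_website_edit_request_py message → Spec_is_website_edit_request_py message (is_website_edit_request_py message)

-- ===== LEMMAS AND PROOFS =====

lemma pvScan_iff (cs : List Char) :
    pvScan cs = true ↔ ∃ t ∈ pvTriggers, t.toList <:+: cs := by
  induction cs with
  | nil =>
    simp only [pvScan]
    constructor
    · intro h; exact absurd h (by decide)
    · rintro ⟨t, ht, hinf⟩
      have : t.toList = [] := List.infix_nil.mp hinf
      fin_cases ht <;> simp_all
  | cons c rest ih =>
    simp only [pvScan, pvScanHere, Bool.or_eq_true, List.any_eq_true, ih]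
    constructor
    · rintro (⟨t, ht, hs⟩ | ⟨t, ht, hinf⟩)
      · exact ⟨t, ht, (List.infix_cons_iff.mpr (Or.inl ((PySem.Chars.startswith_iff _ _).mp hs)))⟩
      · exact ⟨t, ht, List.infix_cons_iff.mpr (Or.inr hinf)⟩
    · rintro ⟨t, ht, hinf⟩
      rcases List.infix_cons_iff.mp hinf with hp | hi
      · exact Or.inl ⟨t, ht, (PySem.Chars.startswith_iff _ _).mpr hp⟩
      · exact Or.inr ⟨t, ht, hi⟩

lemma pvA_iff (message : String) :
    is_website_edit_request_py message = true ↔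
      ∃ t ∈ pvTriggers, t.toList <:+: PySem.Chars.lower message.toList := by
  simp only [is_website_edit_request_py, List.any_eq_true]
  constructor
  · rintro ⟨t, ht, h⟩
    refine ⟨t, ht, ?_⟩
    have := PySem.Str.isIn_eq t (PySem.Str.lower message)
    rw [this] at h
    have h2 := (PySem.Chars.isIn_iff_infix _ _).mp h
    simpa [PySem.Str.toList_lower] using h2
  · rintro ⟨t, ht, h⟩
    refine ⟨t, ht, ?_⟩
    rw [PySem.Str.isIn_eq]
    exact (PySem.Chars.isIn_iff_infix _ _).mpr (by simpa [PySem.Str.toList_lower] using h)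

-- ===== VERDICT (by name: the statement is the Claim_ definition above) =====
theorem is_website_edit_request_py_spec : Claim_equal_is_website_edit_request_py := by
  intro message _
  unfold Spec_is_website_edit_request_py is_website_edit_request_py_alt
  rw [Bool.eq_iff_iff, pvA_iff, pvScan_iff]
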